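-- pv_equiv track=rewrite | github.com/ItzAarnav/Algorithms | shift.py | cyclic_shift_right
-- ===== SOURCE A (Python) =====
-- def cyclic_shift_right(arr, n):
--     if not arr:
--         return arr
--
--     n = n % len(arr)  # Handle cases where n > len(arr)
--     result = [0] * len(arr)
--
--     for i in range(len(arr)):
--         new_position = (i + n) % len(arr)
--         result[new_position] = arr[i]
--
--     return result
-- ===== SOURCE B (Python) =====
-- def cyclic_shift_right(arr, n):
--     if not arr:
--         return arr
--     m = n % len(arr)
--     return arr[-m:] + arr[:-m]
-- ===== Notes on version B (the rewrite author's own statement) =====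
-- stated objective: simpler
-- what changed: Replaces the modular-index scatter loop into a preallocated zero list by a direct construction of the rotation as the concatenation of two slices, arr[-m:] + arr[:-m].
import Mathlib
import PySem

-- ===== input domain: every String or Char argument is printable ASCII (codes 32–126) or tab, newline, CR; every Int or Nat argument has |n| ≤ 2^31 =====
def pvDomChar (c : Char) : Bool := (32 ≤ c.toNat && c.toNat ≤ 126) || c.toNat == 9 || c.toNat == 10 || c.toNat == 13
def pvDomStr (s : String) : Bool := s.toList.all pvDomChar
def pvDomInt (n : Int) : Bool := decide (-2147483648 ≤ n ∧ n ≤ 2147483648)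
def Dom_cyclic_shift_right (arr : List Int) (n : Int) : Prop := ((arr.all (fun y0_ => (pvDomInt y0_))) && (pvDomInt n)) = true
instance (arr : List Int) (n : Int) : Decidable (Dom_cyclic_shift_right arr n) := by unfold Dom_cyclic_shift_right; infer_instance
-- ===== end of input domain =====

-- B builds the rotation directly as the concatenation of two slices instead of A's
-- modular-index scatter loop into a preallocated zero list (objective: simpler).

-- ===== PORT A =====
def cyclic_shift_right (arr : List Int) (n : Int) : List Int :=
  if arr = [] then arr
  else
    let m := PySem.Int.mod n (arr.length : Int)
    (PySem.List.pyRange 0 (arr.length : Int) 1).foldl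
      (fun result i =>
        let newPosition := PySem.Int.mod (i + m) (arr.length : Int)
        PySem.List.pySetD result newPosition (PySem.List.pyGetD arr i 0))
      (List.replicate arr.length 0)

-- ===== PORT B =====
def cyclic_shift_right_alt (arr : List Int) (n : Int) : List Int :=
  if arr = [] then arr
  else
    let m := PySem.Int.mod n (arr.length : Int)
    PySem.List.slice arr (some (-m)) none ++ PySem.List.slice arr none (some (-m))

-- ===== PRECONDITION & SPEC =====
def Spec_cyclic_shift_right (arr : List Int) (n : Int) (out : List Int) : Prop := out = cyclic_shift_right_alt arr n
instance (arr : List Int) (n : Int) (out : List Int) : Decidable (Spec_cyclic_shift_right arr n out) := by unfold Spec_cyclic_shift_right; infer_instance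

-- ===== CLAIM (what is proved, stated in full; the proofs are below) =====
def Claim_equal_cyclic_shift_right : Prop := ∀ (arr : List Int) (n : Int), Dom_cyclic_shift_right arr n → Spec_cyclic_shift_right arr n (cyclic_shift_right arr n)

-- ===== LEMMAS AND PROOFS =====

-- a % L for a < 2L, as a subtraction
theorem pv_mod2 (a L : Nat) (h : a < 2 * L) :
    a % L = if a < L then a else a - L := by
  split_ifs with h1
  · exact Nat.mod_eq_of_lt h1
  · rw [Nat.mod_eq_sub_mod (by omega)]
    exact Nat.mod_eq_of_lt (by omega)

-- length of A's scatter fold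
theorem pv_scat_len (arr : List Int) (M L k : Nat) :
    ((List.range k).foldl (fun r i => r.set ((i + M) % L) (arr.getD i 0))
      (List.replicate L 0)).length = L := by
  induction k with
  | zero => simp
  | succ k ih =>
    rw [List.range_succ, List.foldl_append, List.foldl_cons, List.foldl_nil,
      List.length_set, ih]

-- invariant: after k writes, slot j holds arr[(j+L-M)%L] iff its writer index is < k
theorem pv_scat_get (arr : List Int) (M L k : Nat) (hL : 0 < L) (hM : M < L)
    (hk : k ≤ L) (j : Nat) (hj : j < L) :
    ((List.range k).foldl (fun r i => r.set ((i + M) % L) (arr.getD i 0))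
      (List.replicate L 0))[j]? =
    some (if (j + L - M) % L < k then arr.getD ((j + L - M) % L) 0 else 0) := by
  induction k with
  | zero => simp [hj]
  | succ k ih =>
    have ihk := ih (by omega)
    rw [List.range_succ, List.foldl_append, List.foldl_cons, List.foldl_nil]
    have hw : (j + L - M) % L = if j + L - M < L then j + L - M else j - M := by
      rw [pv_mod2 (j + L - M) L (by omega)]; split_ifs <;> omega
    have hp := pv_mod2 (k + M) L (by omega)
    by_cases hje : (k + M) % L = j
    · have hwk : (j + L - M) % L = k := by
        rw [hw]; split_ifs at hp ⊢ <;> omega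
      rw [hje, List.getElem?_set_self (by rw [pv_scat_len]; omega), hwk,
        if_pos (by omega)]
    · have hne : (j + L - M) % L ≠ k := by
        intro hc; apply hje
        rw [hw] at hc; rw [hp]
        split_ifs at hc ⊢ <;> omega
      rw [List.getElem?_set_ne hje, ihk]
      by_cases hlt : (j + L - M) % L < k
      · rw [if_pos hlt, if_pos (by omega)]
      · rw [if_neg hlt, if_neg (by omega)]

-- A's fold over the Int range reduces to the Nat-level scatter fold
theorem pv_A_eq_scat (arr : List Int) (m : Int) (hm0 : 0 ≤ m) (hmL : m < (arr.length : Int)) :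
    (PySem.List.pyRange 0 (arr.length : Int) 1).foldl
      (fun result i =>
        PySem.List.pySetD result (PySem.Int.mod (i + m) (arr.length : Int))
          (PySem.List.pyGetD arr i 0))
      (List.replicate arr.length 0) =
    (List.range arr.length).foldl
      (fun r i => r.set ((i + m.toNat) % arr.length) (arr.getD i 0))
      (List.replicate arr.length 0) := by
  have hL : 0 < arr.length := by omega
  rw [PySem.List.pyRange_zero_nat, List.foldl_map]
  apply PySem.List.foldl_congr_mem
  intro r i hi
  have hiL : i < arr.length := List.mem_range.mp hi
  have hmod : PySem.Int.mod ((i : Int) + m) (arr.length : Int) =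
      (((i + m.toNat) % arr.length : Nat) : Int) := by
    rw [PySem.Int.mod_eq_emod_of_pos (a := (i : Int) + m) (show (0:Int) < (arr.length : Int) by exact_mod_cast hL)]
    have h1 : (i : Int) + m = ((i + m.toNat : Nat) : Int) := by omega
    rw [h1]
    push_cast; rfl
  rw [hmod, PySem.List.pySetD_natCast, PySem.List.pyGetD_natCast]

-- the rotation, element by element
theorem pv_rot_get (arr : List Int) (M : Nat) (hL : 0 < arr.length)
    (hM : M < arr.length) (j : Nat) (hj : j < arr.length) :
    (arr.drop (arr.length - M) ++ arr.take (arr.length - M))[j]? =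
    some (arr.getD ((j + arr.length - M) % arr.length) 0) := by
  have hw : (j + arr.length - M) % arr.length =
      if j < M then arr.length - M + j else j - M := by
    rw [pv_mod2 _ _ (by omega)]; split_ifs <;> omega
  rw [hw]
  rcases lt_or_ge j M with hjM | hjM
  · rw [if_pos hjM, List.getElem?_append_left (by simp; omega), List.getElem?_drop,
      List.getElem?_eq_getElem (by omega)]
    congr 1
    rw [List.getD_eq_getElem?_getD, List.getElem?_eq_getElem (by omega)]
    rfl
  · rw [if_neg (by omega), List.getElem?_append_right (by simp; omega)]
    have hdl : (arr.drop (arr.length - M)).length = M := by simp; omega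
    rw [hdl, List.getElem?_take_of_lt (by omega), List.getElem?_eq_getElem (by omega)]
    congr 1
    rw [List.getD_eq_getElem?_getD, List.getElem?_eq_getElem (by omega)]
    rfl

-- A computes the rotation
theorem pv_A_rot (arr : List Int) (n : Int) (hne : arr ≠ []) :
    cyclic_shift_right arr n =
    arr.drop (arr.length - (PySem.Int.mod n (arr.length : Int)).toNat) ++
    arr.take (arr.length - (PySem.Int.mod n (arr.length : Int)).toNat) := by
  have hL : 0 < arr.length := List.length_pos_iff.mpr hne
  have hLZ : (0 : Int) < (arr.length : Int) := by exact_mod_cast hL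
  have hm0 : 0 ≤ PySem.Int.mod n (arr.length : Int) := PySem.Int.mod_nonneg n hLZ
  have hmL : PySem.Int.mod n (arr.length : Int) < (arr.length : Int) := PySem.Int.mod_lt n hLZ
  set m := PySem.Int.mod n (arr.length : Int) with hmdef
  have hM : m.toNat < arr.length := by omega
  unfold cyclic_shift_right
  rw [if_neg hne]
  show (PySem.List.pyRange 0 (arr.length : Int) 1).foldl _ _ = _
  rw [pv_A_eq_scat arr m hm0 hmL]
  apply List.ext_getElem?
  intro j
  rcases lt_or_ge j arr.length with hj | hj
  · rw [pv_scat_get arr m.toNat arr.length arr.length hL hM le_rfl j hj,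
      pv_rot_get arr m.toNat hL hM j hj, if_pos (Nat.mod_lt _ hL)]
  · rw [List.getElem?_eq_none (by rw [pv_scat_len]; omega),
      List.getElem?_eq_none (by simp; omega)]

-- B computes the rotation
theorem pv_B_rot (arr : List Int) (n : Int) (hne : arr ≠ []) :
    cyclic_shift_right_alt arr n =
    arr.drop (arr.length - (PySem.Int.mod n (arr.length : Int)).toNat) ++
    arr.take (arr.length - (PySem.Int.mod n (arr.length : Int)).toNat) := by
  have hL : 0 < arr.length := List.length_pos_iff.mpr hne
  have hLZ : (0 : Int) < (arr.length : Int) := by exact_mod_cast hL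
  have hm0 : 0 ≤ PySem.Int.mod n (arr.length : Int) := PySem.Int.mod_nonneg n hLZ
  have hmL : PySem.Int.mod n (arr.length : Int) < (arr.length : Int) := PySem.Int.mod_lt n hLZ
  set m := PySem.Int.mod n (arr.length : Int) with hmdef
  unfold cyclic_shift_right_alt
  rw [if_neg hne]
  show PySem.List.slice arr (some (-m)) none ++ PySem.List.slice arr none (some (-m)) = _
  rcases eq_or_lt_of_le hm0 with h0 | hpos
  · -- m = 0: arr[-0:] = arr, arr[:-0] = []
    rw [← h0]
    have h1 : PySem.List.slice arr (some (-(0:Int))) none = arr := by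
      norm_num [PySem.List.slice_zero_start, PySem.List.slice_none_none]
    have h2 : PySem.List.slice arr none (some (-(0:Int))) = [] := by
      norm_num [PySem.List.slice_to]
    rw [h1, h2]
    simp
  · have hMpos : 0 < m.toNat := by omega
    have hcast : -m = -((m.toNat : Nat) : Int) := by omega
    rw [hcast, PySem.List.slice_from_neg_natCast arr m.toNat hMpos,
      PySem.List.slice_to_neg_natCast arr m.toNat hMpos]

-- ===== VERDICT (by name: the statement is the Claim_ definition above) =====
theorem cyclic_shift_right_spec : Claim_equal_cyclic_shift_right := by
  intro arr n _
  unfold Spec_cyclic_shift_right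
  by_cases hne : arr = []
  · subst hne; rfl
  · rw [pv_A_rot arr n hne, pv_B_rot arr n hne]
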